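-- pv_equiv track=rewrite | github.com/sleirsgoevy/brutejudge | brutejudge/commands/asubmit/format_cpp.py | escape_strings
-- ===== SOURCE A (Python) =====
-- def escape_strings(s):
--     instr = None
--     ans = ''
--     for c in s:
--         if instr == None:
--             ans += c
--             if c in ('"', "'"):
--                 instr = c
--         elif instr.endswith('\\'):
--             ans += '\\x%02x'%ord(c)
--             instr = instr[:1]
--         elif c == '\\':
--             ans += '\\x%02x'%ord(c)
--             instr += '\\'
--         elif instr == c:
--             instr = None
--             ans += c
--         else:
--             ans += '\\x%02x'%ord(c)
--     return ans
-- ===== SOURCE B (Python) =====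
-- def escape_strings(s):
--     out = []
--     i = 0
--     n = len(s)
--     while i < n:
--         c = s[i]
--         i += 1
--         out.append(c)
--         if c in '"\'':
--             while i < n:
--                 d = s[i]
--                 i += 1
--                 if d == '\\':
--                     out.append('\\x%02x' % ord(d))
--                     if i < n:
--                         out.append('\\x%02x' % ord(s[i]))
--                         i += 1
--                 elif d == c:
--                     out.append(d)
--                     break
--                 else:
--                     out.append('\\x%02x' % ord(d))
--     return ''.join(out)
-- ===== Notes on version B (the rewrite author's own statement) =====
-- stated objective: alternative
-- what changed: Replaced A's single fold carrying a mutable string-state machine (instr as a growing/shrinking string) by an index-based outer copy loop with a nested inner loop that consumes a whole string literal, handling a backslash by consuming two characters at once; no state string is maintained.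
import Mathlib
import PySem

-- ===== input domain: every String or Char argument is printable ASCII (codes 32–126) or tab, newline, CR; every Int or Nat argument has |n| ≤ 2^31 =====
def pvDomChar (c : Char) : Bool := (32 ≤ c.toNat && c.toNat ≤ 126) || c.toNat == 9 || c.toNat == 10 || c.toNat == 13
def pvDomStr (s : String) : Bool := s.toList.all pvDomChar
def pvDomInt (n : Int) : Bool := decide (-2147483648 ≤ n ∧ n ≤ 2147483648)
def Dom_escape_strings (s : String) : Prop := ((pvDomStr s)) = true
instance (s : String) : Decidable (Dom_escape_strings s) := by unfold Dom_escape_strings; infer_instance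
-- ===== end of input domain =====

-- B replaces A's one-pass state machine (a mutable `instr` string) by an outer copy loop
-- with a nested loop consuming an entire string literal (backslash consumes two chars at once);
-- same return value, alternative decomposition.

-- ===== PORT A =====
-- '\x%02x' % ord(c): exact for the domain's chars (code ≤ 126, so always two lowercase hex digits)
def pvHexDigit (n : Nat) : Char :=
  if n < 10 then Char.ofNat (48 + n) else Char.ofNat (87 + n)

def pvEsc (c : Char) : List Char :=
  ['\\', 'x', pvHexDigit (c.toNat / 16), pvHexDigit (c.toNat % 16)]

-- state: (ans, instr); instr : Option (List Char) models Python's `instr` (None or a string)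
def escapeStepA (st : List Char × Option (List Char)) (c : Char) : List Char × Option (List Char) :=
  match st with
  | (ans, none) =>
      (ans ++ [c], if c = '"' ∨ c = '\'' then some [c] else none)
  | (ans, some instr) =>
      if instr.getLast? = some '\\' then (ans ++ pvEsc c, some (instr.take 1))
      else if c = '\\' then (ans ++ pvEsc c, some (instr ++ ['\\']))
      else if instr = [c] then (ans ++ [c], none)
      else (ans ++ pvEsc c, some instr)

def escape_strings (s : String) : String :=
  String.ofList (s.toList.foldl escapeStepA ([], none)).1

-- ===== PORT B =====
mutual
-- outer loop: outside any string literal, copy chars; a quote starts the inner loop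
def escapeOuter : List Char → List Char
  | [] => []
  | c :: rest =>
      if c = '"' ∨ c = '\'' then c :: escapeInner c rest
      else c :: escapeOuter rest

-- inner loop: inside a literal opened by q; backslash consumes the next char too
def escapeInner (q : Char) : List Char → List Char
  | [] => []
  | d :: rest =>
      if d = '\\' then
        pvEsc d ++ (match rest with
          | [] => []
          | e :: rest' => pvEsc e ++ escapeInner q rest')
      else if d = q then d :: escapeOuter rest
      else pvEsc d ++ escapeInner q rest
end

def escape_strings_alt (s : String) : String :=
  String.ofList (escapeOuter s.toList)

-- ===== PRECONDITION & SPEC =====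
def Spec_escape_strings (s : String) (out : String) : Prop := out = escape_strings_alt s
instance (s : String) (out : String) : Decidable (Spec_escape_strings s out) := by unfold Spec_escape_strings; infer_instance

-- ===== CLAIM (what is proved, stated in full; the proofs are below) =====
def Claim_equal_escape_strings : Prop := ∀ (s : String), Dom_escape_strings s → Spec_escape_strings s (escape_strings s)

-- ===== LEMMAS AND PROOFS =====

-- main invariant, by strong induction on the length of the remaining input:
-- from state none the fold produces escapeOuter, from state (some [q]) (q a quote) escapeInner q
theorem escape_fold_eq : ∀ (n : Nat) (l : List Char), l.length ≤ n →
    (∀ ans, (l.foldl escapeStepA (ans, none)).1 = ans ++ escapeOuter l) ∧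
    (∀ ans q, q ≠ '\\' → (l.foldl escapeStepA (ans, some [q])).1 = ans ++ escapeInner q l) := by
  intro n
  induction n with
  | zero =>
      intro l hl
      have : l = [] := List.eq_nil_of_length_eq_zero (Nat.le_zero.mp hl)
      subst this
      simp [escapeOuter, escapeInner]
  | succ n ih =>
      intro l hl
      constructor
      · intro ans
        match l with
        | [] => simp [escapeOuter]
        | c :: rest =>
          have hr : rest.length ≤ n := by simpa using Nat.lt_succ_iff.mp (Nat.lt_of_lt_of_le (by simp) hl)
          by_cases hq : c = '"' ∨ c = '\''
          · have hcq : c ≠ '\\' := by rcases hq with h | h <;> simp [h]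
            simp only [List.foldl_cons, escapeStepA, hq, if_pos]
            rw [(ih rest hr).2 (ans ++ [c]) c hcq]
            simp [escapeOuter, hq]
          · simp only [List.foldl_cons, escapeStepA, hq, if_neg, not_false_iff]
            rw [(ih rest hr).1 (ans ++ [c])]
            simp [escapeOuter, hq]
      · intro ans q hq
        match l with
        | [] => simp [escapeInner]
        | c :: rest =>
          have hr : rest.length ≤ n := by simpa using Nat.lt_succ_iff.mp (Nat.lt_of_lt_of_le (by simp) hl)
          have hlast : ([q].getLast? = some '\\') = False := by
            simp [List.getLast?]; exact fun h => hq h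
          by_cases hb : c = '\\'
          · subst hb
            -- step 1: escape the backslash, state becomes some [q, '\\']
            have h1 : escapeStepA (ans, some [q]) '\\' = (ans ++ pvEsc '\\', some [q, '\\']) := by
              simp [escapeStepA, hq]
            rw [show (('\\' :: rest).foldl escapeStepA (ans, some [q]))
                  = rest.foldl escapeStepA (ans ++ pvEsc '\\', some [q, '\\']) by
              simp [List.foldl_cons, h1]]
            match rest with
            | [] =>
              rw [escapeInner]
              simp
            | e :: rest' =>
              have hr' : rest'.length ≤ n := by
                simp only [List.length_cons] at hl
                omega
              -- step 2: instr ends with '\\' → escape e, state back to some [q]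
              have h2 : escapeStepA (ans ++ pvEsc '\\', some [q, '\\']) e
                  = (ans ++ pvEsc '\\' ++ pvEsc e, some [q]) := by
                simp [escapeStepA, List.getLast?]
              rw [show ((e :: rest').foldl escapeStepA (ans ++ pvEsc '\\', some [q, '\\']))
                    = rest'.foldl escapeStepA (ans ++ pvEsc '\\' ++ pvEsc e, some [q]) by
                simp [List.foldl_cons, h2]]
              rw [(ih rest' hr').2 _ q hq]
              rw [escapeInner]
              simp
          · by_cases hc : c = q
            · subst hc
              have h1 : escapeStepA (ans, some [c]) c = (ans ++ [c], none) := by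
                simp [escapeStepA, hb]
              rw [show ((c :: rest).foldl escapeStepA (ans, some [c]))
                    = rest.foldl escapeStepA (ans ++ [c], none) by
                simp [List.foldl_cons, h1]]
              rw [(ih rest hr).1 (ans ++ [c])]
              rw [escapeInner.eq_def]
              simp [hb]
            · have hne : ¬ ([q] = [c]) := by simp [Ne.symm hc]
              have h1 : escapeStepA (ans, some [q]) c = (ans ++ pvEsc c, some [q]) := by
                simp [escapeStepA, hb, hne]
              rw [show ((c :: rest).foldl escapeStepA (ans, some [q]))
                    = rest.foldl escapeStepA (ans ++ pvEsc c, some [q]) by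
                simp [List.foldl_cons, h1]]
              rw [(ih rest hr).2 _ q hq]
              conv_rhs => rw [escapeInner.eq_def]
              simp [hb, hc]

-- ===== VERDICT (by name: the statement is the Claim_ definition above) =====
theorem escape_strings_spec : Claim_equal_escape_strings := by
  intro s _hdom
  unfold Spec_escape_strings escape_strings escape_strings_alt
  rw [(escape_fold_eq s.toList.length s.toList le_rfl).1 []]
  simp
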